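-- pv_equiv track=rewrite | github.com/chiimagnus/LonelyPianist | piano_dialogue_server/server/midi_generation.py | _apply_inversion
-- ===== SOURCE A (Python) =====
-- def _apply_inversion(degrees: list[int]) -> list[int]:
--     """Mirror intervals: ascending becomes descending and vice versa."""
--     if not degrees:
--         return degrees
--     result = [degrees[0]]
--     for i in range(1, len(degrees)):
--         interval = degrees[i] - degrees[i - 1]
--         result.append(result[-1] - interval)
--     return result
-- ===== SOURCE B (Python) =====
-- def _apply_inversion(degrees: list[int]) -> list[int]:
--     """Mirror intervals: ascending becomes descending and vice versa."""
--     if not degrees: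
--         return degrees
--     base = degrees[0]
--     return [2 * base - d for d in degrees]
-- ===== Notes on version B (the rewrite author's own statement) =====
-- stated objective: simpler
-- what changed: Replaced the running-accumulator loop over consecutive differences by the telescoped closed form: each output element is twice the first element minus the corresponding input element, computed independently in one comprehension.
import Mathlib
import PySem

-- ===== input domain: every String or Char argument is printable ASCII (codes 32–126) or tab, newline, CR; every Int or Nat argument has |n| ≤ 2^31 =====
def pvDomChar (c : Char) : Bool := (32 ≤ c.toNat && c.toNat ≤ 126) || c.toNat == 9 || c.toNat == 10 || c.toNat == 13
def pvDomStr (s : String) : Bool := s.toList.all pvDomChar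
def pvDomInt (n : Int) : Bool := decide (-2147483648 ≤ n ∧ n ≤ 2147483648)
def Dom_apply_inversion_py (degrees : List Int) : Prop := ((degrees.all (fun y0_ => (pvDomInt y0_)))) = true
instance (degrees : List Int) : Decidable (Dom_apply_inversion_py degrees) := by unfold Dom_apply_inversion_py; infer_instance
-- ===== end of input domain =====

-- B replaces A's running-accumulator difference loop by the closed form 2*degrees[0] - degrees[i] (simpler).

-- ===== PORT A =====
def apply_inversion_py (degrees : List Int) : List Int :=
  if degrees = [] then degrees
  else
    (PySem.List.pyRange 1 (PySem.List.len degrees) 1).foldl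
      (fun result i =>
        let interval := PySem.List.pyGetD degrees i 0 - PySem.List.pyGetD degrees (i - 1) 0
        result ++ [PySem.List.pyGetD result (-1) 0 - interval])
      [PySem.List.pyGetD degrees 0 0]

-- ===== PORT B =====
def apply_inversion_py_alt (degrees : List Int) : List Int :=
  if degrees = [] then degrees
  else
    let base := PySem.List.pyGetD degrees 0 0
    degrees.map (fun d => 2 * base - d)

-- ===== PRECONDITION & SPEC =====
def Spec_apply_inversion_py (degrees : List Int) (out : List Int) : Prop := out = apply_inversion_py_alt degrees
instance (degrees : List Int) (out : List Int) : Decidable (Spec_apply_inversion_py degrees out) := by unfold Spec_apply_inversion_py; infer_instance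

-- ===== CLAIM (what is proved, stated in full; the proofs are below) =====
def Claim_equal_apply_inversion_py : Prop := ∀ (degrees : List Int), Dom_apply_inversion_py degrees → Spec_apply_inversion_py degrees (apply_inversion_py degrees)

-- ===== LEMMAS AND PROOFS =====

-- Loop invariant: after processing range(1, n+1), A's accumulator is the closed-form map over the first n+1 elements.
lemma apply_inversion_loop (d0 : Int) (rest : List Int) (n : Nat) (hn : n ≤ rest.length) :
    (PySem.List.pyRange 1 ((n : Int) + 1) 1).foldl
      (fun result i =>
        let interval := PySem.List.pyGetD (d0 :: rest) i 0 - PySem.List.pyGetD (d0 :: rest) (i - 1) 0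
        result ++ [PySem.List.pyGetD result (-1) 0 - interval])
      [d0]
    = ((d0 :: rest).take (n + 1)).map (fun d => 2 * d0 - d) := by
  induction n with
  | zero =>
    simp [PySem.List.pyRange]
    ring
  | succ m ih =>
    have hm : m ≤ rest.length := Nat.le_of_succ_le hn
    have hmlt : m + 1 < (d0 :: rest).length := by simp; omega
    have hrange : PySem.List.pyRange 1 ((↑(m + 1) : Int) + 1) 1
        = PySem.List.pyRange 1 ((m : Int) + 1) 1 ++ [((m : Int) + 1)] := by
      have := PySem.List.pyRange_one_succ_right (a := 1) (b := (m : Int) + 1) (by omega)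
      push_cast
      convert this using 2
    rw [hrange, List.foldl_append, ih hm]
    simp only [List.foldl_cons, List.foldl_nil]
    have htake : (d0 :: rest).take (m + 1) = ((d0 :: rest).take m) ++ [(d0 :: rest)[m]] := by
      rw [List.take_add_one]
      simp [List.getElem?_eq_getElem (by simp; omega : m < (d0 :: rest).length)]
    have htake2 : (d0 :: rest).take (m + 2) = ((d0 :: rest).take (m + 1)) ++ [(d0 :: rest)[m + 1]] := by
      rw [List.take_add_one]
      simp [List.getElem?_eq_getElem hmlt]
    have hidx1 : PySem.List.pyGetD (d0 :: rest) ((m : Int) + 1) 0 = (d0 :: rest)[m + 1] := by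
      have : ((m : Int) + 1) = ((m + 1 : Nat) : Int) := by push_cast; ring
      rw [this, PySem.List.pyGetD_natCast, List.getD_eq_getElem _ _ hmlt]
    have hidx0 : PySem.List.pyGetD (d0 :: rest) ((m : Int) + 1 - 1) 0 = (d0 :: rest)[m] := by
      have : ((m : Int) + 1 - 1) = ((m : Nat) : Int) := by ring
      rw [this, PySem.List.pyGetD_natCast, List.getD_eq_getElem _ _ (by simp; omega)]
    have hlast : PySem.List.pyGetD (((d0 :: rest).take (m + 1)).map (fun d => 2 * d0 - d)) (-1) 0
        = 2 * d0 - (d0 :: rest)[m] := by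
      rw [htake, List.map_append, List.map_singleton, PySem.List.pyGetD_neg_one_append_singleton]
    rw [hidx1, hidx0, hlast, htake2, List.map_append, List.map_singleton]
    congr 2
    ring

-- ===== VERDICT (by name: the statement is the Claim_ definition above) =====
theorem apply_inversion_py_spec : Claim_equal_apply_inversion_py := by
  intro degrees _
  unfold Spec_apply_inversion_py apply_inversion_py apply_inversion_py_alt
  cases degrees with
  | nil => simp
  | cons d0 rest =>
    simp only [reduceCtorEq, if_false, PySem.List.len_eq, List.length_cons,
      PySem.List.pyGetD_zero_cons]
    have hlen : ((rest.length + 1 : Nat) : Int) = (rest.length : Int) + 1 := by push_cast; ring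
    rw [hlen, apply_inversion_loop d0 rest rest.length le_rfl]
    simp
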